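-- pv_equiv track=rewrite | github.com/scozzano/study-planner-with-AI | backend/src/recommender/spm_inference.py | pattern_occurs_and_end_index
-- ===== SOURCE A (Python) =====
-- from typing import Dict, Any, List, Tuple, Optional, Set
--
-- def pattern_occurs_and_end_index(pattern: List[str], seq_terms: List[List[str]]) -> Optional[int]:
--     if not pattern:
--         return -1
--     start = 0
--     for p in pattern:
--         found = False
--         for term_idx in range(start, len(seq_terms)):
--             if p in seq_terms[term_idx]:
--                 start = term_idx + 1
--                 found = True
--                 break
--         if not found:
--             return None
--     return start - 1
-- ===== SOURCE B (Python) =====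
-- from typing import List, Optional
--
-- def pattern_occurs_and_end_index(pattern: List[str], seq_terms: List[List[str]]) -> Optional[int]:
--     pi = 0
--     end_index = -1
--     for idx, itemset in enumerate(seq_terms):
--         if pi < len(pattern) and pattern[pi] in itemset:
--             end_index = idx
--             pi += 1
--     return end_index if pi == len(pattern) else None
-- ===== Notes on version B (the rewrite author's own statement) =====
-- stated objective: alternative
-- what changed: Inverted the loop nesting: instead of A's per-pattern-element inner forward scan with break over seq_terms, B makes one pass over seq_terms advancing a pattern pointer whenever the current itemset contains the next pattern element; the empty-pattern -1 falls out naturally.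
import Mathlib
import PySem

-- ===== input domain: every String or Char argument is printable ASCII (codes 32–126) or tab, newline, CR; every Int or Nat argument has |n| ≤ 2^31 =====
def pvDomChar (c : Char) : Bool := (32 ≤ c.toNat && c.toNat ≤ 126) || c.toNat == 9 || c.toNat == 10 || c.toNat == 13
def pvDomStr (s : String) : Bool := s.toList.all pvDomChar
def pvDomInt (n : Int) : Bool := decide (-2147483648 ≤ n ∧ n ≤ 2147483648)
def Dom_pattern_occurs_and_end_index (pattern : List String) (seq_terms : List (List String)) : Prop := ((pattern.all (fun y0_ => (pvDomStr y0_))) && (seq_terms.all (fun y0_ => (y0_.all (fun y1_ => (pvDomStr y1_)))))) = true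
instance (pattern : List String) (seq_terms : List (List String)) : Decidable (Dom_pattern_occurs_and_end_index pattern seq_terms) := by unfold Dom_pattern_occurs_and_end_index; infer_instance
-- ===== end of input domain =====

set_option maxRecDepth 8000

-- B replaces A's per-pattern-element forward scan by a single pass over seq_terms with a
-- pattern pointer (alternative decomposition, same asymptotic cost); proved equal on all inputs.


-- ===== PORT A =====
-- inner loop: `for term_idx in range(start, len(seq_terms)): if p in seq_terms[term_idx]: ... break`
def aScan (seq_terms : List (List String)) (p : String) (i : Nat) : Option Nat :=
  if h : i < seq_terms.length then
    if p ∈ seq_terms[i] then some (i + 1) else aScan seq_terms p (i + 1)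
  else none
termination_by seq_terms.length - i

-- outer loop: `for p in pattern:` carrying `start`
def aLoop (seq_terms : List (List String)) : List String → Nat → Option Int
  | [], start => some ((start : Int) - 1)
  | p :: ps, start =>
    match aScan seq_terms p start with
    | some s => aLoop seq_terms ps s
    | none => none

def pattern_occurs_and_end_index (pattern : List String) (seq_terms : List (List String)) : Option Int :=
  if pattern = [] then some (-1) else aLoop seq_terms pattern 0

-- ===== PORT B =====
-- B: one pass over seq_terms with a pattern pointer pi and end_index
def bGo (pattern : List String) : List (List String) → Nat → Nat → Int → Nat × Int
  | [], _, pi, e => (pi, e)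
  | t :: ts, idx, pi, e =>
    if pi < pattern.length ∧ pattern.getD pi "" ∈ t then
      bGo pattern ts (idx + 1) (pi + 1) (idx : Int)
    else
      bGo pattern ts (idx + 1) pi e

def pattern_occurs_and_end_index_alt (pattern : List String) (seq_terms : List (List String)) : Option Int :=
  match bGo pattern seq_terms 0 0 (-1) with
  | (pi, e) => if pi = pattern.length then some e else none

-- ===== PRECONDITION & SPEC =====
def Spec_pattern_occurs_and_end_index (pattern : List String) (seq_terms : List (List String)) (out : Option Int) : Prop := out = pattern_occurs_and_end_index_alt pattern seq_terms
instance (pattern : List String) (seq_terms : List (List String)) (out : Option Int) : Decidable (Spec_pattern_occurs_and_end_index pattern seq_terms out) := by unfold Spec_pattern_occurs_and_end_index; infer_instance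

-- ===== CLAIM (what is proved, stated in full; the proofs are below) =====
def Claim_equal_pattern_occurs_and_end_index : Prop := ∀ (pattern : List String) (seq_terms : List (List String)), Dom_pattern_occurs_and_end_index pattern seq_terms → Spec_pattern_occurs_and_end_index pattern seq_terms (pattern_occurs_and_end_index pattern seq_terms)

-- ===== LEMMAS AND PROOFS =====

-- common middle form: mutual greedy recursion over the suffix of seq_terms
def asem : List String → List (List String) → Nat → Option Int
  | [], _, i => some ((i : Int) - 1)
  | _ :: _, [], _ => none
  | p :: ps, t :: ts, i =>
    if p ∈ t then asem ps ts (i + 1) else asem (p :: ps) ts (i + 1)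

def bRes (pattern : List String) (ts : List (List String)) (idx pi : Nat) (e : Int) : Option Int :=
  match bGo pattern ts idx pi e with
  | (pi', e') => if pi' = pattern.length then some e' else none

theorem bGo_done (pattern : List String) : ∀ (ts : List (List String)) (idx pi : Nat) (e : Int),
    pattern.length ≤ pi → bGo pattern ts idx pi e = (pi, e) := by
  intro ts
  induction ts with
  | nil => intro idx pi e h; rfl
  | cons t ts ih =>
    intro idx pi e h
    simp only [bGo, if_neg (by omega : ¬ (pi < pattern.length ∧ pattern.getD pi "" ∈ t))]
    exact ih _ _ _ h

theorem bRes_asem (pattern : List String) : ∀ (ts : List (List String)) (idx pi : Nat) (e : Int),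
    pi < pattern.length → bRes pattern ts idx pi e = asem (pattern.drop pi) ts idx := by
  intro ts
  induction ts with
  | nil =>
    intro idx pi e h
    rw [(List.getElem_cons_drop h).symm]
    simp only [bRes, bGo, asem]
    rw [if_neg (Nat.ne_of_lt h)]
  | cons t ts ih =>
    intro idx pi e h
    have hd : pattern.drop pi = pattern[pi] :: pattern.drop (pi + 1) :=
      (List.getElem_cons_drop h).symm
    have hget : pattern.getD pi "" = pattern[pi] := List.getD_eq_getElem _ _ h
    rw [hd]
    simp only [asem]
    by_cases hm : pattern[pi] ∈ t
    · rw [if_pos hm]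
      have hcond : pi < pattern.length ∧ pattern.getD pi "" ∈ t := ⟨h, by rw [hget]; exact hm⟩
      have hstep : bRes pattern (t :: ts) idx pi e = bRes pattern ts (idx + 1) (pi + 1) (idx : Int) := by
        simp only [bRes, bGo, if_pos hcond]
      rw [hstep]
      by_cases hlast : pi + 1 < pattern.length
      · exact ih (idx + 1) (pi + 1) (idx : Int) hlast
      · have hdrop : pattern.drop (pi + 1) = [] := List.drop_eq_nil_of_le (by omega)
        have hlen : pi + 1 = pattern.length := by omega
        rw [hdrop]
        simp only [bRes, bGo_done pattern ts (idx + 1) (pi + 1) (idx : Int) (by omega)]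
        rw [if_pos hlen]
        simp only [asem, Option.some.injEq]
        push_cast
        ring
    · rw [if_neg hm]
      have hcond : ¬ (pi < pattern.length ∧ pattern.getD pi "" ∈ t) := by
        rw [hget]; exact fun hc => hm hc.2
      have hstep : bRes pattern (t :: ts) idx pi e = bRes pattern ts (idx + 1) pi e := by
        simp only [bRes, bGo, if_neg hcond]
      have ih' := ih (idx + 1) pi e h
      rw [hd] at ih'
      rw [hstep, ih']

theorem aScan_eq (seq_terms : List (List String)) (p : String) (i : Nat) (h : i < seq_terms.length) :
    aScan seq_terms p i =
      if p ∈ seq_terms[i] then some (i + 1) else aScan seq_terms p (i + 1) := by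
  rw [aScan]
  simp [h]

theorem aLoop_asem (seq_terms : List (List String)) : ∀ (ts : List (List String)) (rem : List String) (i : Nat),
    seq_terms.drop i = ts → aLoop seq_terms rem i = asem rem ts i := by
  intro ts
  induction ts with
  | nil =>
    intro rem i hdrop
    have hlen : seq_terms.length ≤ i := by
      have := congrArg List.length hdrop
      simp at this
      omega
    cases rem with
    | nil => simp [aLoop, asem]
    | cons p ps =>
      have hs : aScan seq_terms p i = none := by rw [aScan]; simp [Nat.not_lt.mpr hlen]
      simp [aLoop, hs, asem]
  | cons t ts ih =>
    intro rem i hdrop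
    have hlt : i < seq_terms.length := by
      by_contra hge
      rw [List.drop_eq_nil_of_le (Nat.le_of_not_lt hge)] at hdrop
      exact absurd hdrop (by simp)
    have hcd : seq_terms.drop i = seq_terms[i] :: seq_terms.drop (i + 1) :=
      (List.getElem_cons_drop hlt).symm
    rw [hcd] at hdrop
    have ht : seq_terms[i] = t := (List.cons.injEq _ _ _ _ ▸ hdrop).1
    have hts : seq_terms.drop (i + 1) = ts := (List.cons.injEq _ _ _ _ ▸ hdrop).2
    cases rem with
    | nil => simp [aLoop, asem]
    | cons p ps =>
      by_cases hm : p ∈ t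
      · have hs : aScan seq_terms p i = some (i + 1) := by
          rw [aScan_eq _ _ _ hlt, ht, if_pos hm]
        simp only [aLoop, hs]
        rw [ih ps (i + 1) hts]
        simp [asem, hm]
      · have hs : aScan seq_terms p i = aScan seq_terms p (i + 1) := by
          rw [aScan_eq _ _ _ hlt, ht, if_neg hm]
        have : aLoop seq_terms (p :: ps) i = aLoop seq_terms (p :: ps) (i + 1) := by
          simp only [aLoop, hs]
        rw [this, ih (p :: ps) (i + 1) hts]
        simp [asem, hm]

-- ===== VERDICT (by name: the statement is the Claim_ definition above) =====
theorem pattern_occurs_and_end_index_spec : Claim_equal_pattern_occurs_and_end_index := by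
  intro pattern seq_terms _
  unfold Spec_pattern_occurs_and_end_index
  unfold pattern_occurs_and_end_index pattern_occurs_and_end_index_alt
  by_cases hp : pattern = []
  · subst hp
    rw [bGo_done [] seq_terms 0 0 (-1) (by simp)]
    simp
  · have hlen : 0 < pattern.length := List.length_pos_iff.mpr hp
    have hb : (match bGo pattern seq_terms 0 0 (-1) with
        | (pi, e) => if pi = pattern.length then some e else none) =
        bRes pattern seq_terms 0 0 (-1) := rfl
    rw [if_neg hp, hb, bRes_asem pattern seq_terms 0 0 (-1) hlen,
        aLoop_asem seq_terms seq_terms pattern 0 (by simp)]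
    simp
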